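-- pv_equiv track=rewrite | github.com/carlosp/advent-of-code | 2024/19-linen-layout/solve_2.py | countAllWaysToMakeAnyDesign
-- ===== SOURCE A (Python) =====
-- from functools import cache
--
-- def countAllWaysToMakeAnyDesign(availablePatterns: list[str], desiredDesigns: list[str]) -> int:
-- 	@cache
-- 	def countWaysToMakeDesign(design: str) -> int:
-- 		return design == '' or sum(
-- 			countWaysToMakeDesign(design.removeprefix(pattern))
-- 			for pattern in availablePatterns
-- 			if design.startswith(pattern)
-- 		)
--
-- 	return sum(map(countWaysToMakeDesign, desiredDesigns))
-- ===== SOURCE B (Python) =====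
-- def countAllWaysToMakeAnyDesign(availablePatterns: list[str], desiredDesigns: list[str]) -> int:
-- 	cnt = {}
-- 	for p in availablePatterns:
-- 		cnt[p] = cnt.get(p, 0) + 1
-- 	lens = sorted({len(p) for p in availablePatterns})
-- 	total = 0
-- 	for design in desiredDesigns:
-- 		n = len(design)
-- 		dp = [0] * (n + 1)
-- 		dp[n] = 1
-- 		for i in range(n - 1, -1, -1):
-- 			dp[i] = sum(cnt.get(design[i:i + L], 0) * dp[i + L] for L in lens if i + L <= n)
-- 		total += dp[0]
-- 	return total
-- ===== Notes on version B (the rewrite author's own statement) =====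
-- stated objective: faster
-- what changed: Replaces the memoized top-down recursion that scans every pattern with startswith at each suffix by a bottom-up DP table per design that, at each position, hash-looks-up the substring of each distinct pattern length in a pre-built multiplicity dict, so the per-position cost drops from O(P) startswith tests to O(#distinct lengths) hash lookups.
-- crash fix: When '' is among availablePatterns and some desired design is nonempty, A hits unbounded recursion (RecursionError); B returns the count contributed by the nonempty patterns (the empty pattern adds nothing in its DP). — e.g. on countAllWaysToMakeAnyDesign([""], ["a"]): A raises RecursionError, B returns 0
import Mathlib
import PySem

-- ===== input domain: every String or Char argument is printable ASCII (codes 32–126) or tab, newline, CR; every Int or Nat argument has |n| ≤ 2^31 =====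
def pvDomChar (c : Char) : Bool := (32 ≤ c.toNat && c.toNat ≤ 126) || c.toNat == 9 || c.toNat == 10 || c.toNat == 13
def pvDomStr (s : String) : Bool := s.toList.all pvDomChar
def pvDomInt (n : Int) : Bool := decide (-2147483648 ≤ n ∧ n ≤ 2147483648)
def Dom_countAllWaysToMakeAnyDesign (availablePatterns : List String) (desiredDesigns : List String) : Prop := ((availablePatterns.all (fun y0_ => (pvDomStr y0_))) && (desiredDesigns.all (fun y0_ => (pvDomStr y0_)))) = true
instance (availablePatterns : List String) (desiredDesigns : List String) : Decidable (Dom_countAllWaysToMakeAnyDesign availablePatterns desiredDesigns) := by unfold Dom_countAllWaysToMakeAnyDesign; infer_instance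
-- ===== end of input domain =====

-- B replaces A's memoized recursion (a startswith scan over ALL patterns at every suffix) by a
-- bottom-up DP table per design driven by a pattern-multiplicity dict keyed by substring, looked up
-- once per distinct pattern length per position (objective: faster).

-- ===== PORT A =====
-- design.removeprefix(pattern): drops len(pattern) chars when pattern is a prefix, else unchanged (exact)
def pvRemovePrefixA (design pattern : List Char) : List Char :=
  if PySem.Chars.startswith design pattern then
    PySem.Chars.slice design (some ((pattern.length : Int))) none
  else design

-- countWaysToMakeDesign; fuel only makes the recursion total (inside Pre_ the depth is ≤ len(design)+1);
-- @cache affects speed only, not the value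
def pvCountWaysA (availablePatterns : List (List Char)) : Nat → List Char → Int
  | 0, _ => 0
  | fuel + 1, design =>
    if design = [] then 1
    else ((availablePatterns.filter (fun p => PySem.Chars.startswith design p)).map
        (fun p => pvCountWaysA availablePatterns fuel (pvRemovePrefixA design p))).sum

def countAllWaysToMakeAnyDesign (availablePatterns : List String) (desiredDesigns : List String) : Int :=
  (desiredDesigns.map
    (fun d => pvCountWaysA (availablePatterns.map String.toList) (d.toList.length + 1) d.toList)).sum

-- ===== PORT B =====
-- per-design suffix DP: dp[i] = number of ways to compose design[i:]
def pvCountB (cnt : PySem.Dict (List Char) Int) (lens : List Int) (design : List Char) : Int :=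
  let n := design.length
  let dp0 := (List.replicate (n + 1) (0 : Int)).set n 1
  let dp := (PySem.List.pyRange ((n : Int) - 1) (-1) (-1)).foldl
      (fun dp i => PySem.List.pySetD dp i
        (((lens.filter (fun L => i + L ≤ (n : Int))).map
          (fun L => cnt.getD (PySem.List.slice design (some i) (some (i + L))) 0 *
                    PySem.List.pyGetD dp (i + L) 0)).sum)) dp0
  PySem.List.pyGetD dp 0 0

def countAllWaysToMakeAnyDesign_alt (availablePatterns : List String) (desiredDesigns : List String) : Int :=
  let ps := availablePatterns.map String.toList
  let cnt := ps.foldl (fun c p => c.insert p (c.getD p 0 + 1)) PySem.Dict.empty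
  let lens := PySem.List.sorted (PySem.Set.ofList (ps.map (fun p => ((p.length : Int))))) (fun x => x) false
  desiredDesigns.foldl (fun tot d => tot + pvCountB cnt lens d.toList) 0

-- ===== PRECONDITION & SPEC =====
-- Pre_ excludes exactly the inputs where A raises: with '' among the patterns and some nonempty
-- design, A's recursion never terminates (RecursionError); everywhere else A returns.
def Pre_countAllWaysToMakeAnyDesign (availablePatterns : List String) (desiredDesigns : List String) : Prop :=
  "" ∈ availablePatterns → ∀ d ∈ desiredDesigns, d = ""
instance (availablePatterns : List String) (desiredDesigns : List String) : Decidable (Pre_countAllWaysToMakeAnyDesign availablePatterns desiredDesigns) := by unfold Pre_countAllWaysToMakeAnyDesign; infer_instance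

def pvWitness_countAllWaysToMakeAnyDesign : List String × List String := (["r", "wr", "b"], ["brwrr", ""])

-- When '' is among availablePatterns and some design is nonempty, A raises RecursionError; B returns
-- the count contributed by the other patterns (the empty pattern adds nothing in its DP).
def Raises_countAllWaysToMakeAnyDesign (availablePatterns : List String) (desiredDesigns : List String) : Prop :=
  "" ∈ availablePatterns ∧ ∃ d ∈ desiredDesigns, d ≠ ""
instance (availablePatterns : List String) (desiredDesigns : List String) : Decidable (Raises_countAllWaysToMakeAnyDesign availablePatterns desiredDesigns) := by unfold Raises_countAllWaysToMakeAnyDesign; infer_instance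
def pvRaiseWitness_countAllWaysToMakeAnyDesign : List String × List String := ([""], ["a"])
def pvRaiseWitnessOut_countAllWaysToMakeAnyDesign : Int := 0

def Spec_countAllWaysToMakeAnyDesign (availablePatterns : List String) (desiredDesigns : List String) (out : Int) : Prop := out = countAllWaysToMakeAnyDesign_alt availablePatterns desiredDesigns
instance (availablePatterns : List String) (desiredDesigns : List String) (out : Int) : Decidable (Spec_countAllWaysToMakeAnyDesign availablePatterns desiredDesigns out) := by unfold Spec_countAllWaysToMakeAnyDesign; infer_instance

-- ===== CLAIM (what is proved, stated in full; the proofs are below) =====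
def Claim_equal_countAllWaysToMakeAnyDesign : Prop := ∀ (availablePatterns : List String) (desiredDesigns : List String), Dom_countAllWaysToMakeAnyDesign availablePatterns desiredDesigns → Pre_countAllWaysToMakeAnyDesign availablePatterns desiredDesigns → Spec_countAllWaysToMakeAnyDesign availablePatterns desiredDesigns (countAllWaysToMakeAnyDesign availablePatterns desiredDesigns)

def Claim_raises_countAllWaysToMakeAnyDesign : Prop := (∀ (availablePatterns : List String) (desiredDesigns : List String), Dom_countAllWaysToMakeAnyDesign availablePatterns desiredDesigns → Raises_countAllWaysToMakeAnyDesign availablePatterns desiredDesigns → ¬ Pre_countAllWaysToMakeAnyDesign availablePatterns desiredDesigns) ∧ (Dom_countAllWaysToMakeAnyDesign (pvRaiseWitness_countAllWaysToMakeAnyDesign.1) (pvRaiseWitness_countAllWaysToMakeAnyDesign.2) ∧ Raises_countAllWaysToMakeAnyDesign (pvRaiseWitness_countAllWaysToMakeAnyDesign.1) (pvRaiseWitness_countAllWaysToMakeAnyDesign.2) ∧ countAllWaysToMakeAnyDesign_alt (pvRaiseWitness_countAllWaysToMakeAnyDesign.1) (pvRaiseWitness_countAllWaysToMakeAnyDesign.2)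 = pvRaiseWitnessOut_countAllWaysToMakeAnyDesign)

-- ===== LEMMAS AND PROOFS =====

theorem pvRemove_eq (d p : List Char) (h : PySem.Chars.startswith d p = true) :
    pvRemovePrefixA d p = d.drop p.length := by
  simp [pvRemovePrefixA, h, PySem.Chars.slice_eq_listSlice, PySem.List.slice_from_natCast]

-- fuel irrelevance for A's recursion (no empty pattern)
theorem pvFuelEq (ps : List (List Char)) (hP : [] ∉ ps) :
    ∀ m (d : List Char), d.length ≤ m → ∀ f g, d.length < f → d.length < g →
      pvCountWaysA ps f d = pvCountWaysA ps g d := by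
  intro m
  induction m with
  | zero =>
    intro d hd f g hf hg
    have hdnil : d = [] := List.length_eq_zero_iff.mp (Nat.le_zero.mp hd)
    obtain ⟨f', rfl⟩ : ∃ k, f = k + 1 := ⟨f - 1, by omega⟩
    obtain ⟨g', rfl⟩ : ∃ k, g = k + 1 := ⟨g - 1, by omega⟩
    simp [pvCountWaysA, hdnil]
  | succ m ih =>
    intro d hd f g hf hg
    obtain ⟨f', rfl⟩ : ∃ k, f = k + 1 := ⟨f - 1, by omega⟩
    obtain ⟨g', rfl⟩ : ∃ k, g = k + 1 := ⟨g - 1, by omega⟩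
    by_cases hdnil : d = []
    · simp [pvCountWaysA, hdnil]
    · simp only [pvCountWaysA, if_neg hdnil]
      congr 1
      apply List.map_congr_left
      intro p hp
      rw [List.mem_filter] at hp
      obtain ⟨hpm, hsw⟩ := hp
      have hpre : p <+: d := (PySem.Chars.startswith_iff d p).mp hsw
      have hpne : p ≠ [] := fun h => hP (h ▸ hpm)
      have hplen : 0 < p.length := List.length_pos_iff.mpr hpne
      have hple : p.length ≤ d.length := hpre.length_le
      rw [pvRemove_eq d p hsw]
      have hlen : (d.drop p.length).length = d.length - p.length := List.length_drop
      exact ih (d.drop p.length) (by omega) f' g' (by omega) (by omega)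

-- everything-zero sum when p has no slot / is not a prefix
theorem pvSumZero (p s : List Char) (w : Int → Int) :
    ∀ lens : List Int, (∀ L ∈ lens, 0 < L) → ((p.length : Int)) ∉ lens →
      ((lens.filter (fun L => L ≤ (s.length : Int))).map
        (fun L => (if s.take L.toNat = p then (1 : Int) else 0) * w L)).sum = 0 := by
  intro lens
  induction lens with
  | nil => simp
  | cons L rest ih =>
    intro hpos hnot
    have hposr : ∀ x ∈ rest, 0 < x := fun x hx => hpos x (List.mem_cons_of_mem _ hx)
    have hLpos : 0 < L := hpos L List.mem_cons_self
    have hnotr : ((p.length : Int)) ∉ rest := fun h => hnot (List.mem_cons_of_mem _ h)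
    have hLne : L ≠ ((p.length : Int)) := fun h => hnot (h ▸ List.mem_cons_self)
    by_cases hL : L ≤ (s.length : Int)
    · rw [List.filter_cons_of_pos (by simpa using hL)]
      simp only [List.map_cons, List.sum_cons]
      have htake : s.take L.toNat ≠ p := by
        intro htk
        have hlen := congrArg List.length htk
        simp [List.length_take] at hlen
        exact hLne (by omega)
      rw [if_neg htake, zero_mul, zero_add]
      exact ih hposr hnotr
    · rw [List.filter_cons_of_neg (by simpa using hL)]
      exact ih hposr hnotr

theorem pvIndSum (p s : List Char) (w : Int → Int) :
    ∀ lens : List Int, lens.Nodup → (∀ L ∈ lens, 0 < L) →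
      (((p.length : Int)) ∈ lens ∨ ¬ p <+: s) →
      ((lens.filter (fun L => L ≤ (s.length : Int))).map
        (fun L => (if s.take L.toNat = p then (1 : Int) else 0) * w L)).sum
      = if p <+: s then w (p.length : Int) else 0 := by
  intro lens
  induction lens with
  | nil =>
    intro _ _ hmem
    rcases hmem with h | h
    · simp at h
    · simp [h]
  | cons L rest ih =>
    intro hnd hpos hmem
    obtain ⟨hLnotin, hndrest⟩ := List.nodup_cons.mp hnd
    have hposr : ∀ x ∈ rest, 0 < x := fun x hx => hpos x (List.mem_cons_of_mem _ hx)
    have hLpos : 0 < L := hpos L List.mem_cons_self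
    by_cases hL : L ≤ (s.length : Int)
    · rw [List.filter_cons_of_pos (by simpa using hL)]
      simp only [List.map_cons, List.sum_cons]
      by_cases htake : s.take L.toNat = p
      · have hpl : p.length = L.toNat := by
          have hlen := congrArg List.length htake
          simp [List.length_take] at hlen
          omega
        have hLp : L = ((p.length : Int)) := by omega
        have hpres : p <+: s := htake ▸ List.take_prefix _ _
        rw [if_pos htake, if_pos hpres, one_mul]
        rw [pvSumZero p s w rest hposr (hLp ▸ hLnotin)]
        rw [hLp]; ring
      · rw [if_neg htake, zero_mul, zero_add]
        apply ih hndrest hposr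
        rcases hmem with hm | hm
        · rcases List.mem_cons.mp hm with he | hm'
          · by_cases hpres : p <+: s
            · exfalso
              apply htake
              have hps : p = s.take p.length := List.prefix_iff_eq_take.mp hpres
              have : L.toNat = p.length := by omega
              rw [this, ← hps]
            · exact Or.inr hpres
          · exact Or.inl hm'
        · exact Or.inr hm
    · rw [List.filter_cons_of_neg (by simpa using hL)]
      apply ih hndrest hposr
      rcases hmem with hm | hm
      · rcases List.mem_cons.mp hm with he | hm'
        · right
          intro hpres
          have hle := hpres.length_le
          apply hL
          rw [← he]
          exact_mod_cast hle
        · exact Or.inl hm'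
      · exact Or.inr hm

-- grouping by pattern length: dict-of-counts sum over lengths = per-pattern prefix sum
theorem pvGroup (s : List Char) (w : Int → Int) (lens : List Int)
    (hnd : lens.Nodup) (hpos : ∀ L ∈ lens, 0 < L) :
    ∀ ps : List (List Char), (∀ p ∈ ps, p ≠ [] ∧ ((p.length : Int)) ∈ lens) →
      ((lens.filter (fun L => L ≤ (s.length : Int))).map
        (fun L => ((ps.count (s.take L.toNat) : Int)) * w L)).sum
      = ((ps.filter (fun p => PySem.Chars.startswith s p)).map (fun p => w ((p.length : Int)))).sum := by
  intro ps
  induction ps with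
  | nil =>
    intro _
    simp
  | cons p ps ih =>
    intro hall
    obtain ⟨hpne, hplen⟩ := hall p List.mem_cons_self
    have hrest := fun q hq => hall q (List.mem_cons_of_mem _ hq)
    have hsplit : ∀ L ∈ lens.filter (fun L => L ≤ (s.length : Int)),
        (fun L => (((p :: ps).count (s.take L.toNat) : Int)) * w L) L
        = (fun L => ((ps.count (s.take L.toNat) : Int)) * w L
            + (if s.take L.toNat = p then (1 : Int) else 0) * w L) L := by
      intro L _
      simp only [List.count_cons]
      push_cast
      by_cases h : s.take L.toNat = p
      · simp [h]; ring
      · simp [h]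
        exact Or.inl (fun he => h he.symm)
    rw [List.map_congr_left hsplit, PySem.List.sum_map_add_int, ih hrest,
        pvIndSum p s w lens hnd hpos (Or.inl hplen)]
    by_cases hsw : PySem.Chars.startswith s p = true
    · rw [List.filter_cons_of_pos hsw, if_pos ((PySem.Chars.startswith_iff s p).mp hsw)]
      simp only [List.map_cons, List.sum_cons]
      ring
    · rw [List.filter_cons_of_neg (by simpa using hsw),
          if_neg (fun hpre => hsw ((PySem.Chars.startswith_iff s p).mpr hpre))]
      ring

-- the inner DP sum at position k equals A's count for the suffix d.drop k
theorem pvStep (ps : List (List Char)) (hP : [] ∉ ps)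
    (cnt : PySem.Dict (List Char) Int) (hcnt : ∀ q, cnt.getD q 0 = (ps.count q : Int))
    (lens : List Int) (hnd : lens.Nodup) (hpos : ∀ L ∈ lens, 0 < L)
    (hmem : ∀ p ∈ ps, ((p.length : Int)) ∈ lens)
    (d : List Char) (k : Nat) (hk : k < d.length) (dp : List Int)
    (hdp : ∀ j : Nat, k < j → j ≤ d.length →
      dp.getD j 0 = pvCountWaysA ps (d.length - j + 1) (d.drop j)) :
    ((lens.filter (fun L => (k : Int) + L ≤ (d.length : Int))).map
      (fun L => cnt.getD (PySem.List.slice d (some (k : Int)) (some ((k : Int) + L))) 0 *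
                PySem.List.pyGetD dp ((k : Int) + L) 0)).sum
    = pvCountWaysA ps (d.length - k + 1) (d.drop k) := by
  have hsl : (d.drop k).length = d.length - k := List.length_drop
  have hfc : lens.filter (fun L => (k : Int) + L ≤ (d.length : Int))
      = lens.filter (fun L => L ≤ (((d.drop k).length : Nat) : Int)) := by
    apply List.filter_congr
    intro L _
    rw [hsl]
    have : ((d.length - k : Nat) : Int) = (d.length : Int) - k := by omega
    rw [this]
    exact decide_eq_decide.mpr (by omega)
  rw [hfc]
  have hmc : ∀ L ∈ lens.filter (fun L => L ≤ (((d.drop k).length : Nat) : Int)),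
      (fun L => cnt.getD (PySem.List.slice d (some (k : Int)) (some ((k : Int) + L))) 0 *
                PySem.List.pyGetD dp ((k : Int) + L) 0) L
      = (fun L => ((ps.count ((d.drop k).take L.toNat) : Int)) *
          pvCountWaysA ps (d.length - (k + L.toNat) + 1) (d.drop (k + L.toNat))) L := by
    intro L hL
    rw [List.mem_filter] at hL
    obtain ⟨hLm, hLle⟩ := hL
    have hLpos : 0 < L := hpos L hLm
    have hLle' : L ≤ (d.length : Int) - k := by
      have := of_decide_eq_true hLle
      omega
    have hslice : PySem.List.slice d (some (k : Int)) (some ((k : Int) + L))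
        = (d.drop k).take L.toNat := by
      rw [PySem.List.slice_toNat d (by omega) (by omega)]
      simp only [Int.toNat_natCast]
      congr 1
      omega
    have hidx : (k : Int) + L = (((k + L.toNat : Nat)) : Int) := by omega
    beta_reduce
    rw [hslice, hcnt, hidx, PySem.List.pyGetD_natCast dp (k + L.toNat) 0,
        hdp (k + L.toNat) (by omega) (by omega)]
  rw [List.map_congr_left hmc]
  rw [pvGroup (d.drop k) (fun L => pvCountWaysA ps (d.length - (k + L.toNat) + 1) (d.drop (k + L.toNat)))
        lens hnd hpos ps (fun p hp => ⟨fun h => hP (h ▸ hp), hmem p hp⟩)]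
  have hsne : d.drop k ≠ [] := by
    intro h
    have := congrArg List.length h
    simp [hsl] at this
    omega
  have hfuel : d.length - k + 1 = (d.length - k) + 1 := rfl
  conv_rhs => rw [hfuel]
  rw [show pvCountWaysA ps ((d.length - k) + 1) (d.drop k)
      = if d.drop k = [] then 1 else
        ((ps.filter (fun p => PySem.Chars.startswith (d.drop k) p)).map
          (fun p => pvCountWaysA ps (d.length - k) (pvRemovePrefixA (d.drop k) p))).sum from rfl]
  rw [if_neg hsne]
  congr 1
  apply List.map_congr_left
  intro p hp
  rw [List.mem_filter] at hp
  obtain ⟨hpm, hsw⟩ := hp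
  have hpne : p ≠ [] := fun h => hP (h ▸ hpm)
  have hppos : 0 < p.length := List.length_pos_iff.mpr hpne
  have hple : p.length ≤ (d.drop k).length := ((PySem.Chars.startswith_iff _ p).mp hsw).length_le
  have htn : ((p.length : Int)).toNat = p.length := by omega
  rw [htn, pvRemove_eq _ p hsw, List.drop_drop]
  rw [hsl] at hple
  exact pvFuelEq ps hP d.length _ (by simp only [List.length_drop]; omega) _ _
    (by simp only [List.length_drop]; omega) (by simp only [List.length_drop]; omega)

-- running B's countdown loop establishes the invariant everywhere
theorem pvLoop (ps : List (List Char)) (hP : [] ∉ ps)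
    (cnt : PySem.Dict (List Char) Int) (hcnt : ∀ q, cnt.getD q 0 = (ps.count q : Int))
    (lens : List Int) (hnd : lens.Nodup) (hpos : ∀ L ∈ lens, 0 < L)
    (hmem : ∀ p ∈ ps, ((p.length : Int)) ∈ lens) (d : List Char) :
    ∀ (k : Nat), k ≤ d.length → ∀ dp : List Int, dp.length = d.length + 1 →
      (∀ j : Nat, k ≤ j → j ≤ d.length →
        dp.getD j 0 = pvCountWaysA ps (d.length - j + 1) (d.drop j)) →
      ∀ j : Nat, j ≤ d.length →
        (((List.range k).map (fun (t : Nat) => ((k : Int)) - 1 - (t : Int))).foldl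
          (fun dp i => PySem.List.pySetD dp i
            (((lens.filter (fun L => i + L ≤ (d.length : Int))).map
              (fun L => cnt.getD (PySem.List.slice d (some i) (some (i + L))) 0 *
                        PySem.List.pyGetD dp (i + L) 0)).sum)) dp).getD j 0
        = pvCountWaysA ps (d.length - j + 1) (d.drop j) := by
  intro k
  induction k with
  | zero =>
    intro _ dp _ hdp j hj
    simpa using hdp j (Nat.zero_le j) hj
  | succ k ih =>
    intro hk dp hlen hdp j hj
    have hlist : (List.range (k + 1)).map (fun (t : Nat) => (((k + 1 : Nat)) : Int) - 1 - (t : Int))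
        = ((k : Nat) : Int) :: (List.range k).map (fun (t : Nat) => ((k : Nat) : Int) - 1 - (t : Int)) := by
      rw [List.range_succ_eq_map, List.map_cons, List.map_map]
      congr 1
      · push_cast; ring
      · apply List.map_congr_left
        intro t _
        simp only [Function.comp]
        push_cast
        ring
    rw [hlist, List.foldl_cons, PySem.List.pySetD_natCast]
    set v := ((lens.filter (fun L => ((k : Nat) : Int) + L ≤ (d.length : Int))).map
        (fun L => cnt.getD (PySem.List.slice d (some ((k : Nat) : Int)) (some (((k : Nat) : Int) + L))) 0 *
                  PySem.List.pyGetD dp (((k : Nat) : Int) + L) 0)).sum with hv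
    have hvW : v = pvCountWaysA ps (d.length - k + 1) (d.drop k) := by
      rw [hv]
      exact pvStep ps hP cnt hcnt lens hnd hpos hmem d k (by omega) dp
        (fun j h1 h2 => hdp j (by omega) h2)
    apply ih (by omega) (dp.set k v) (by simpa using hlen)
    · intro j' hj1 hj2
      rw [List.getD_eq_getElem?_getD, List.getElem?_set]
      by_cases hjk : k = j'
      · subst hjk
        rw [if_pos rfl, if_pos (by omega)]
        simpa using hvW
      · rw [if_neg hjk, ← List.getD_eq_getElem?_getD]
        exact hdp j' (by omega) hj2
    · exact hj

theorem pvCountB_nil (cnt : PySem.Dict (List Char) Int) (lens : List Int) :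
    pvCountB cnt lens [] = 1 := by
  simp [pvCountB, PySem.List.pyGetD_zero]

theorem pvPerDesign (ps : List (List Char)) (hP : [] ∉ ps)
    (cnt : PySem.Dict (List Char) Int) (hcnt : ∀ q, cnt.getD q 0 = (ps.count q : Int))
    (lens : List Int) (hnd : lens.Nodup) (hpos : ∀ L ∈ lens, 0 < L)
    (hmem : ∀ p ∈ ps, ((p.length : Int)) ∈ lens) (d : List Char) :
    pvCountB cnt lens d = pvCountWaysA ps (d.length + 1) d := by
  have hrange : PySem.List.pyRange ((d.length : Int) - 1) (-1) (-1)
      = (List.range d.length).map (fun (t : Nat) => ((d.length : Int)) - 1 - (t : Int)) := by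
    rw [PySem.List.pyRange_neg_one]
    rw [show ((d.length : Int) - 1 - (-1)).toNat = d.length by omega]
  have hdp0 : ∀ j : Nat, d.length ≤ j → j ≤ d.length →
      ((List.replicate (d.length + 1) (0 : Int)).set d.length 1).getD j 0
      = pvCountWaysA ps (d.length - j + 1) (d.drop j) := by
    intro j h1 h2
    have hj : j = d.length := by omega
    subst hj
    rw [List.getD_eq_getElem?_getD, List.getElem?_set, if_pos rfl,
        if_pos (by simp)]
    simp [pvCountWaysA]
  have := pvLoop ps hP cnt hcnt lens hnd hpos hmem d d.length le_rfl
    ((List.replicate (d.length + 1) (0 : Int)).set d.length 1)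
    (by simp) hdp0 0 (Nat.zero_le _)
  simp only [pvCountB, hrange, PySem.List.pyGetD_zero]
  simpa using this

theorem countAllWaysToMakeAnyDesign_spec : Claim_equal_countAllWaysToMakeAnyDesign := by
  intro pats designs _ hpre
  unfold Spec_countAllWaysToMakeAnyDesign
  unfold countAllWaysToMakeAnyDesign countAllWaysToMakeAnyDesign_alt
  simp only
  rw [PySem.List.foldl_add, zero_add]
  congr 1
  apply List.map_congr_left
  intro d hd
  by_cases hE : "" ∈ pats
  · have hd0 : d = "" := hpre hE d hd
    subst hd0
    rw [show ("" : String).toList = [] from rfl, pvCountB_nil]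
    simp [pvCountWaysA]
  · have hP : [] ∉ pats.map String.toList := by
      intro h
      rw [List.mem_map] at h
      obtain ⟨x, hx, hx0⟩ := h
      exact hE (String.toList_eq_nil_iff.mp hx0 ▸ hx)
    have hcnt : ∀ q, ((pats.map String.toList).foldl
        (fun c p => c.insert p (c.getD p 0 + 1)) PySem.Dict.empty).getD q 0
        = ((pats.map String.toList).count q : Int) := by
      intro q
      rw [PySem.Dict.foldl_insert_getD_add_one_eq_counter, PySem.Dict.getD_counter]
    have hnd : (PySem.List.sorted (PySem.Set.ofList ((pats.map String.toList).map
        (fun p => ((p.length : Int))))) (fun x => x) false).Nodup :=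
      ((PySem.List.sorted_perm _ _ _).nodup_iff).mpr (PySem.Set.nodup_ofList _)
    have hmem : ∀ p ∈ pats.map String.toList, ((p.length : Int)) ∈
        PySem.List.sorted (PySem.Set.ofList ((pats.map String.toList).map
          (fun p => ((p.length : Int))))) (fun x => x) false := by
      intro p hp
      rw [PySem.List.mem_sorted, PySem.Set.mem_ofList]
      exact List.mem_map_of_mem hp
    have hpos : ∀ L ∈ PySem.List.sorted (PySem.Set.ofList ((pats.map String.toList).map
        (fun p => ((p.length : Int))))) (fun x => x) false, 0 < L := by
      intro L hL
      rw [PySem.List.mem_sorted, PySem.Set.mem_ofList, List.mem_map] at hL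
      obtain ⟨p, hp, rfl⟩ := hL
      have : p ≠ [] := fun h => hP (h ▸ hp)
      have := List.length_pos_iff.mpr this
      omega
    rw [pvPerDesign (pats.map String.toList) hP _ hcnt _ hnd hpos hmem d.toList]

theorem countAllWaysToMakeAnyDesign_raises : Claim_raises_countAllWaysToMakeAnyDesign := by
  unfold Claim_raises_countAllWaysToMakeAnyDesign
  exact ⟨by intro aps dds _ hr hpre; obtain ⟨h1, d, hd, hne⟩ := hr; exact hne (hpre h1 d hd), by decide⟩

-- self-check: B's port really returns the stated value at the raise witness
theorem pvRaises_witness :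
    countAllWaysToMakeAnyDesign_alt pvRaiseWitness_countAllWaysToMakeAnyDesign.1
      pvRaiseWitness_countAllWaysToMakeAnyDesign.2 = pvRaiseWitnessOut_countAllWaysToMakeAnyDesign :=
  countAllWaysToMakeAnyDesign_raises.2.2.2
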